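-- pv_equiv track=rewrite | github.com/Jiaju-Chen/AgentEconomist | AgentEconomist/tools/parameter.py | _organize_parameters_by_category
-- ===== SOURCE A (Python) =====
-- from typing import Optional, Dict, Any
--
-- def _organize_parameters_by_category(yaml_config: Dict[str, Any]) -> Dict[str, list]:
--     """将参数按类别组织"""
--     categories = {
--         "tax_policy": [],
--         "labor_market": [],
--         "production": [],
--         "market": [],
--         "system_scale": [],
--         "redistribution": [],
--         "performance": [],
--         "monitoring": [],
--         "innovation": [],
--     }
--
--     # 从 YAML 配置中提取参数
--     for category, params in yaml_config.items():
--         if isinstance(params, dict):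
--             for param_name in params.keys():
--                 if category in categories:
--                     # 使用点号格式：category.param_name
--                     categories[category].append(f"{category}.{param_name}")
--
--     return categories
-- ===== SOURCE B (Python) =====
-- _CATEGORY_NAMES = (
--     "tax_policy", "labor_market", "production", "market", "system_scale",
--     "redistribution", "performance", "monitoring", "innovation",
-- )
--
--
-- def _organize_parameters_by_category(yaml_config):
--     """将参数按类别组织"""
--     return {
--         cat: [f"{cat}.{p}" for p in params]
--         if isinstance(params := yaml_config.get(cat), dict) else []
--         for cat in _CATEGORY_NAMES
--     }
-- ===== Notes on version B (the rewrite author's own statement) =====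
-- stated objective: simpler
-- what changed: B inverts the iteration: instead of scanning yaml_config and testing each key's membership in a pre-built category dict that is mutated by appends, it maps over the fixed 9-category list doing one .get lookup per category, building each list with a comprehension; Pre_ only excludes association lists with duplicate outer keys, which represent no Python dict (dict keys are unique).
import Mathlib
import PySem

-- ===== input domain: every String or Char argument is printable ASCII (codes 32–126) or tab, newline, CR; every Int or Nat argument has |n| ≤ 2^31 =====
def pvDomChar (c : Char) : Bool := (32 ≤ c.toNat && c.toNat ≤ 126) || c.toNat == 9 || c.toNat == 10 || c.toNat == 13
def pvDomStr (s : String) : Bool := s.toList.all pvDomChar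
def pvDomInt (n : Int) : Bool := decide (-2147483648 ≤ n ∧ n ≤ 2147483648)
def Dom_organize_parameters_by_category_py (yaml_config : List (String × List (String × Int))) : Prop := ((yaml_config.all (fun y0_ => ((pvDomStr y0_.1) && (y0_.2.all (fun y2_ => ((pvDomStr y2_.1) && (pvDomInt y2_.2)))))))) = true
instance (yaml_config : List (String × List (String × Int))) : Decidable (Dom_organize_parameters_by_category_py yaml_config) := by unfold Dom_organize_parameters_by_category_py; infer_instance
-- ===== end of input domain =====

-- B organizes the parameters by driving the computation from the fixed category list
-- (one lookup per category) instead of scanning the config with membership tests: simpler.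
-- Note: the Lean input type makes every value a dict, so Python's `isinstance(params, dict)`
-- guard is identically true on the ported domain (it appears as `.get` returning a dict/None in B).

-- ===== PORT A =====
-- the fixed `categories` dict literal of A, every category mapped to an empty list
def pvInitCats : PySem.Dict String (List String) :=
  PySem.Dict.mk [("tax_policy", []), ("labor_market", []), ("production", []),
    ("market", []), ("system_scale", []), ("redistribution", []),
    ("performance", []), ("monitoring", []), ("innovation", [])]

-- inner loop body: for param_name in params: if category in categories: append
def pvStepA (d : PySem.Dict String (List String)) (cp : String × List (String × Int)) :
    PySem.Dict String (List String) :=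
  cp.2.foldl (fun d p =>
    if d.contains cp.1 then d.modify cp.1 [] (fun l => l ++ [cp.1 ++ "." ++ p.1]) else d) d

def organize_parameters_by_category_py (yaml_config : List (String × List (String × Int))) : List (String × List String) :=
  (yaml_config.foldl pvStepA pvInitCats).items

-- ===== PORT B =====
def pvCatNames : List String :=
  ["tax_policy", "labor_market", "production", "market", "system_scale",
   "redistribution", "performance", "monitoring", "innovation"]

def organize_parameters_by_category_py_alt (yaml_config : List (String × List (String × Int))) : List (String × List String) :=
  pvCatNames.map (fun cat =>
    (cat, match yaml_config.find? (fun e => e.1 == cat) with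
          | some e => e.2.map (fun p => cat ++ "." ++ p.1)
          | none => []))

-- ===== PRECONDITION & SPEC =====
-- Pre_ excludes association lists with duplicate outer keys: they do not represent any Python
-- dict (a dict's keys are unique), and the two ports read such duplicates differently.
def Pre_organize_parameters_by_category_py (yaml_config : List (String × List (String × Int))) : Prop :=
  (yaml_config.map Prod.fst).Nodup
instance (yaml_config : List (String × List (String × Int))) : Decidable (Pre_organize_parameters_by_category_py yaml_config) := by unfold Pre_organize_parameters_by_category_py; infer_instance

def pvWitness_organize_parameters_by_category_py : (List (String × List (String × Int))) :=
  [("market", [("fee", 3), ("cap", 100)]), ("oddball", [("x", 1)]), ("tax_policy", [])]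

def Spec_organize_parameters_by_category_py (yaml_config : List (String × List (String × Int))) (out : List (String × List String)) : Prop := out = organize_parameters_by_category_py_alt yaml_config
instance (yaml_config : List (String × List (String × Int))) (out : List (String × List String)) : Decidable (Spec_organize_parameters_by_category_py yaml_config out) := by unfold Spec_organize_parameters_by_category_py; infer_instance

-- ===== CLAIM (what is proved, stated in full; the proofs are below) =====
def Claim_equal_organize_parameters_by_category_py : Prop := ∀ (yaml_config : List (String × List (String × Int))), Dom_organize_parameters_by_category_py yaml_config → Pre_organize_parameters_by_category_py yaml_config → Spec_organize_parameters_by_category_py yaml_config (organize_parameters_by_category_py yaml_config)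

-- ===== LEMMAS AND PROOFS =====

-- everything A's loop ever appends for category c, concatenated in traversal order
def pvCollect (c : String) (yaml : List (String × List (String × Int))) : List String :=
  yaml.foldr (fun e acc =>
    (if e.1 = c then e.2.map (fun p => c ++ "." ++ p.1) else []) ++ acc) []

theorem pvCollect_nil (c : String) : pvCollect c [] = [] := rfl

theorem pvCollect_cons (c : String) (e : String × List (String × Int)) (rest : List (String × List (String × Int))) :
    pvCollect c (e :: rest) =
      (if e.1 = c then e.2.map (fun p => c ++ "." ++ p.1) else []) ++ pvCollect c rest := rfl

-- the inner loop preserves `contains`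
theorem contains_pvStepA (d : PySem.Dict String (List String)) (cp : String × List (String × Int)) (c : String) :
    (pvStepA d cp).contains c = d.contains c := by
  unfold pvStepA
  induction cp.2 generalizing d with
  | nil => rfl
  | cons p ps ih =>
    simp only [List.foldl_cons]
    rw [ih]
    by_cases h : d.contains cp.1
    · simp only [h, if_true, PySem.Dict.contains_modify]
      by_cases hc : (c == cp.1) = true
      · simp [h, beq_iff_eq.mp hc]
      · simp [hc]
    · simp [h]

-- the inner loop preserves `keys`
theorem keys_pvStepA (d : PySem.Dict String (List String)) (cp : String × List (String × Int)) :
    (pvStepA d cp).keys = d.keys := by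
  unfold pvStepA
  induction cp.2 generalizing d with
  | nil => rfl
  | cons p ps ih =>
    simp only [List.foldl_cons]
    rw [ih]
    by_cases h : d.contains cp.1
    · rw [if_pos h, PySem.Dict.keys_modify, PySem.Dict.keys_insert_of_contains d _ h]
    · simp [h]

-- value of a present key after the inner loop
theorem getD_pvStepA (d : PySem.Dict String (List String)) (cp : String × List (String × Int)) (c : String)
    (hc : d.contains c = true) :
    (pvStepA d cp).getD c [] =
      d.getD c [] ++ (if cp.1 = c then cp.2.map (fun p => c ++ "." ++ p.1) else []) := by
  unfold pvStepA
  induction cp.2 generalizing d with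
  | nil => simp
  | cons p ps ih =>
    simp only [List.foldl_cons, List.map_cons]
    by_cases h : cp.1 = c
    · subst h
      rw [if_pos hc]
      rw [ih _ (by rw [PySem.Dict.contains_modify]; simp)]
      simp [PySem.Dict.getD_modify_self]
    · by_cases h1 : d.contains cp.1
      · rw [if_pos h1]
        rw [ih _ (by rw [PySem.Dict.contains_modify]; simp [hc])]
        simp [h, PySem.Dict.getD_modify_of_ne d [] _ (fun hce => h hce.symm)]
      · rw [if_neg (by simp [h1]), ih _ hc]
        simp [h]

-- value of a present key after the whole outer loop
theorem getD_foldA (yaml : List (String × List (String × Int))) (d : PySem.Dict String (List String)) (c : String)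
    (hc : d.contains c = true) :
    (yaml.foldl pvStepA d).getD c [] = d.getD c [] ++ pvCollect c yaml := by
  induction yaml generalizing d with
  | nil => simp [pvCollect_nil]
  | cons e rest ih =>
    simp only [List.foldl_cons]
    rw [ih _ (by rw [contains_pvStepA]; exact hc), getD_pvStepA d e c hc, pvCollect_cons,
      List.append_assoc]

theorem keys_foldA (yaml : List (String × List (String × Int))) (d : PySem.Dict String (List String)) :
    (yaml.foldl pvStepA d).keys = d.keys := by
  induction yaml generalizing d with
  | nil => rfl
  | cons e rest ih => simp only [List.foldl_cons]; rw [ih, keys_pvStepA]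

-- if c never occurs as a key, the loop collects nothing for it
theorem pvCollect_of_not_mem (c : String) (yaml : List (String × List (String × Int)))
    (h : c ∉ yaml.map Prod.fst) : pvCollect c yaml = [] := by
  induction yaml with
  | nil => rfl
  | cons e rest ih =>
    simp only [List.map_cons, List.mem_cons, not_or] at h
    rw [pvCollect_cons, if_neg (fun he => h.1 he.symm), ih h.2, List.nil_append]

-- with unique outer keys, the concatenation is exactly the first (only) match
theorem pvCollect_eq_find (c : String) (yaml : List (String × List (String × Int)))
    (hnd : (yaml.map Prod.fst).Nodup) :
    pvCollect c yaml =
      (match yaml.find? (fun e => e.1 == c) with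
       | some e => e.2.map (fun p => c ++ "." ++ p.1)
       | none => []) := by
  induction yaml with
  | nil => rfl
  | cons e rest ih =>
    simp only [List.map_cons, List.nodup_cons] at hnd
    rw [pvCollect_cons]
    by_cases h : e.1 = c
    · rw [if_pos h, pvCollect_of_not_mem c rest (h ▸ hnd.1), List.append_nil,
        List.find?_cons_of_pos (by simp [h])]
    · rw [if_neg h, List.nil_append, ih hnd.2,
        List.find?_cons_of_neg (by simp [h])]

-- ===== VERDICT (by name: the statement is the Claim_ definition above) =====
theorem organize_parameters_by_category_py_spec : Claim_equal_organize_parameters_by_category_py := by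
  intro yaml _ hpre
  unfold Spec_organize_parameters_by_category_py
  unfold organize_parameters_by_category_py organize_parameters_by_category_py_alt
  have hkeys : (yaml.foldl pvStepA pvInitCats).keys = pvCatNames := by
    rw [keys_foldA]; decide
  have hnd : (yaml.foldl pvStepA pvInitCats).keys.Nodup := by rw [hkeys]; decide
  rw [PySem.Dict.items_eq_map_keys _ hnd [], hkeys]
  apply List.map_congr_left
  intro c hcmem
  have hc : pvInitCats.contains c = true := by
    fin_cases hcmem <;> decide
  rw [getD_foldA yaml pvInitCats c hc, pvCollect_eq_find c yaml hpre]
  have hinit : pvInitCats.getD c [] = [] := by fin_cases hcmem <;> decide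
  rw [hinit, List.nil_append]
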